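-- pv_equiv track=rewrite | github.com/jpaubry/advent-of-code-2025 | day10/puzzle2_bak.py | find_minimum_with_limit
-- ===== SOURCE A (Python) =====
-- from collections import deque
-- from collections import deque
-- from collections import deque
--
-- def find_minimum_with_limit(buttons, target, max_presses=500):
--     """
--     BFS with depth limit to avoid infinite search
--     """
--     n = len(target)
--     target_tuple = tuple(target)
--     goal = tuple([0] * n)
--
--     if target_tuple == goal:
--         return 0
--
--     queue = deque([(target_tuple, 0)])
--     visited = {target_tuple}
--
--     while queue:
--         state, presses = queue.popleft()
--
--         # Stop if too many presses
--         if presses >= max_presses: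
--             continue
--
--         for button in buttons:
--             new_state = tuple(state[i] - int(button[i]) for i in range(n))
--
--             if any(x < 0 for x in new_state):
--                 continue
--
--             if new_state == goal:
--                 return presses + 1
--
--             if new_state not in visited:
--                 visited.add(new_state)
--                 queue.append((new_state, presses + 1))
--
--     return -1
-- ===== SOURCE B (Python) =====
-- def find_minimum_with_limit(buttons, target, max_presses=500):
--     """
--     Iterative-deepening depth-first search: for each depth bound 1..max_presses,
--     a depth-limited recursive DFS tries to reach the all-zero vector; the first
--     bound that succeeds is the minimum number of presses.  A 'cutoff' flag says
--     whether the search was truncated by the bound; if a bound fails with no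
--     cutoff, no deeper bound can succeed and we answer -1 immediately.
--     """
--     n = len(target)
--     if all(x == 0 for x in target):
--         return 0
--     if max_presses <= 0:
--         return -1
--     vecs = [[int(b[i]) for i in range(n)] for b in buttons]
--
--     def dfs(state, depth):
--         # returns (found, cutoff)
--         if all(x == 0 for x in state):
--             return (True, False)
--         if depth == 0:
--             return (False, True)
--         cutoff = False
--         for vec in vecs:
--             nxt = [state[i] - vec[i] for i in range(n)]
--             if any(x < 0 for x in nxt):
--                 continue
--             f, c = dfs(nxt, depth - 1)
--             if f:
--                 return (True, False)
--             cutoff = cutoff or c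
--         return (False, cutoff)
--
--     for bound in range(1, max_presses + 1):
--         found, cutoff = dfs(list(target), bound)
--         if found:
--             return bound
--         if not cutoff:
--             return -1
--     return -1
-- ===== Notes on version B (the rewrite author's own statement) =====
-- stated objective: alternative
-- what changed: Replaces the FIFO-queue BFS with visited-set by iterative-deepening depth-limited recursive DFS (with a cutoff flag that stops deepening once the bounded search space is exhausted).
-- outside the precondition, e.g. on find_minimum_with_limit([['1'], ['x']], [1], 1): A returns 1, B raises ValueError
import Mathlib
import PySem

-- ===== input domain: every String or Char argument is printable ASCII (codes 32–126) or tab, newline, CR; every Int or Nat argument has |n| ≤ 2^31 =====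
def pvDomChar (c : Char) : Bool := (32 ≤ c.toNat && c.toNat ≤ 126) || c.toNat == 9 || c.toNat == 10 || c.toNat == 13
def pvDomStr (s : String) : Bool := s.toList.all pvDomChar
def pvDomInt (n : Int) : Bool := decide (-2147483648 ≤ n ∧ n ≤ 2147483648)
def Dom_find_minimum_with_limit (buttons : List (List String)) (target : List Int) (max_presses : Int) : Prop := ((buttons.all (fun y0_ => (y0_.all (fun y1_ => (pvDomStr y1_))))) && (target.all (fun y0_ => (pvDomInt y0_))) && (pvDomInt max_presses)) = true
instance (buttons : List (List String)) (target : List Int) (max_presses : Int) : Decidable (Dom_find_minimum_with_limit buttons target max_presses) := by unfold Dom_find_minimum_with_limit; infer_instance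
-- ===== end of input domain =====

-- B replaces A's FIFO-queue BFS (visited set, per-node press counters) by iterative-deepening
-- depth-limited recursive DFS with a cutoff flag (objective: alternative algorithm, not faster).

-- ===== PORT A =====
-- tuple(state[i] - int(button[i]) for i in range(n)); int(·) is total here via getD 0,
-- exact on Pre_ (which excludes the inputs where Python's int()/indexing raises)
def pvChildA (n : Int) (s : List Int) (b : List String) : List Int :=
  (PySem.List.pyRange 0 n 1).map (fun i =>
    PySem.List.pyGetD s i 0 - (PySem.Int.ofStr? (PySem.List.pyGetD b i "")).getD 0)

-- any(x < 0 for x in l)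
def pvAnyNeg (l : List Int) : Bool := l.any (fun x => decide (x < 0))

-- the inner `for button in buttons` loop of A: either returns presses+1 (Sum.inl)
-- or the list of entries appended to the queue plus the updated visited set
def pvExpandA (n : Int) (goal : List Int) (s : List Int) (p : Int) :
    List (List String) → PySem.Set (List Int) → List (List Int × Int) →
    Sum Int (List (List Int × Int) × PySem.Set (List Int))
  | [], V, acc => Sum.inr (acc, V)
  | b :: bs, V, acc =>
    let ns := pvChildA n s b
    if pvAnyNeg ns then pvExpandA n goal s p bs V acc
    else if ns = goal then Sum.inl (p + 1)
    else if PySem.Set.contains V ns then pvExpandA n goal s p bs V acc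
    else pvExpandA n goal s p bs (PySem.Set.add V ns) (acc ++ [(ns, p + 1)])

-- facts about the appended entries, needed only for pvLoopA's termination measure
theorem pvExpandA_entries (n : Int) (goal s : List Int) (p : Int) :
    ∀ (bs : List (List String)) (V : PySem.Set (List Int)) (acc : List (List Int × Int))
      (nw : List (List Int × Int)) (V' : PySem.Set (List Int)),
      pvExpandA n goal s p bs V acc = Sum.inr (nw, V') →
      nw.length ≤ acc.length + bs.length ∧ ∀ e ∈ nw, e ∈ acc ∨ e.2 = p + 1 := by
  intro bs
  induction bs with
  | nil =>
    intro V acc nw V' h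
    simp only [pvExpandA] at h
    obtain ⟨h1, h2⟩ := Sum.inr.injEq _ _ ▸ h
    cases h
    exact ⟨by omega, fun e he => Or.inl he⟩
  | cons b bs ih =>
    intro V acc nw V' h
    simp only [pvExpandA] at h
    split at h
    · obtain ⟨h1, h2⟩ := ih _ _ _ _ h
      exact ⟨by simpa using Nat.le_trans h1 (by omega), h2⟩
    · split at h
      · exact absurd h (by simp)
      · split at h
        · obtain ⟨h1, h2⟩ := ih _ _ _ _ h
          exact ⟨by simpa using Nat.le_trans h1 (by omega), h2⟩
        · obtain ⟨h1, h2⟩ := ih _ _ _ _ h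
          refine ⟨by simp at h1 ⊢; omega, fun e he => ?_⟩
          rcases h2 e he with he' | he'
          · rcases List.mem_append.1 he' with h'' | h''
            · exact Or.inl h''
            · simp at h''; subst h''; exact Or.inr rfl
          · exact Or.inr he'

def pvQMeasure (w : Nat) (mx : Int) (Q : List (List Int × Int)) : Nat :=
  (Q.map (fun e => w ^ (mx - e.2).toNat)).sum

theorem pvQMeasure_tail (w : Nat) (hw : 1 ≤ w) (mx : Int) (e : List Int × Int)
    (Q : List (List Int × Int)) : pvQMeasure w mx Q < pvQMeasure w mx (e :: Q) := by
  simp only [pvQMeasure, List.map_cons, List.sum_cons]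
  have : 0 < w ^ (mx - e.2).toNat := Nat.pow_pos hw
  omega

theorem pvQMeasure_expand (w : Nat) (hw : 1 ≤ w) (mx p : Int) (hp : p < mx)
    (s : List Int) (Q nw : List (List Int × Int))
    (hsnd : ∀ e ∈ nw, e.2 = p + 1) (hlen : nw.length ≤ w - 1) :
    pvQMeasure w mx (Q ++ nw) < pvQMeasure w mx ((s, p) :: Q) := by
  simp only [pvQMeasure, List.map_cons, List.sum_cons, List.map_append, List.sum_append]
  have hk : (mx - p).toNat = (mx - (p + 1)).toNat + 1 := by omega
  have hbound : (nw.map (fun e => w ^ (mx - e.2).toNat)).sum ≤ nw.length * w ^ (mx - (p + 1)).toNat := by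
    have := List.sum_le_card_nsmul (nw.map (fun e => w ^ (mx - e.2).toNat))
      (w ^ (mx - (p + 1)).toNat) (by
        intro x hx
        obtain ⟨e, he, rfl⟩ := List.mem_map.1 hx
        rw [hsnd e he])
    simpa [smul_eq_mul] using this
  have hpow : 0 < w ^ (mx - (p + 1)).toNat := Nat.pow_pos hw
  have : nw.length * w ^ (mx - (p + 1)).toNat < w ^ (mx - p).toNat := by
    rw [hk, pow_succ]
    calc nw.length * w ^ (mx - (p + 1)).toNat
        ≤ (w - 1) * w ^ (mx - (p + 1)).toNat := Nat.mul_le_mul_right _ hlen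
      _ < w * w ^ (mx - (p + 1)).toNat := by
          exact Nat.mul_lt_mul_of_lt_of_le (by omega) (le_refl _) hpow
      _ = w ^ (mx - (p + 1)).toNat * w := Nat.mul_comm _ _
  omega

-- the `while queue:` loop of A
def pvLoopA (buttons : List (List String)) (n : Int) (goal : List Int) (mx : Int) :
    List (List Int × Int) → PySem.Set (List Int) → Int
  | [], _ => -1
  | (s, p) :: Q, V =>
    if mx ≤ p then pvLoopA buttons n goal mx Q V
    else
      match h : pvExpandA n goal s p buttons V [] with
      | Sum.inl r => r
      | Sum.inr (nw, V') => pvLoopA buttons n goal mx (Q ++ nw) V'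
termination_by Q _ => pvQMeasure (buttons.length + 1) mx Q
decreasing_by
  · exact pvQMeasure_tail _ (by omega) _ _ _
  · have hs := pvExpandA_entries n goal s p buttons V [] nw V' h
    exact pvQMeasure_expand _ (by omega) _ _ (by omega) s Q nw
      (fun e he => (hs.2 e he).resolve_left (by simp)) (by simpa using hs.1)

def find_minimum_with_limit (buttons : List (List String)) (target : List Int) (max_presses : Int) : Int :=
  let n : Int := PySem.List.len target
  let goal : List Int := List.replicate n.toNat 0
  if target = goal then 0
  else pvLoopA buttons n goal max_presses [(target, 0)] (PySem.Set.ofList [target])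

-- ===== PORT B =====
-- vecs = [[int(b[i]) for i in range(n)] for b in buttons]
def pvVecs (buttons : List (List String)) (n : Int) : List (List Int) :=
  buttons.map (fun b =>
    (PySem.List.pyRange 0 n 1).map (fun i => (PySem.Int.ofStr? (PySem.List.pyGetD b i "")).getD 0))

-- nxt = [state[i] - vec[i] for i in range(n)]
def pvNxt (n : Int) (s v : List Int) : List Int :=
  (PySem.List.pyRange 0 n 1).map (fun i => PySem.List.pyGetD s i 0 - PySem.List.pyGetD v i 0)

-- all(x == 0 for x in s)
def pvIsZero (s : List Int) : Bool := s.all (fun x => decide (x = 0))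

mutual
-- def dfs(state, depth) -> (found, cutoff)
def pvDfsB (vecs : List (List Int)) (n : Int) (s : List Int) (d : Nat) : Bool × Bool :=
  if pvIsZero s then (true, false)
  else
    match d with
    | 0 => (false, true)
    | d' + 1 => pvDfsGo vecs n vecs s d' false
termination_by (d, 0)

-- the `for vec in vecs` loop inside dfs, with its early return on found
def pvDfsGo (vecs : List (List Int)) (n : Int) (vs : List (List Int)) (s : List Int)
    (d' : Nat) (cut : Bool) : Bool × Bool :=
  match vs with
  | [] => (false, cut)
  | v :: rest =>
    let nxt := pvNxt n s v
    if pvAnyNeg nxt then pvDfsGo vecs n rest s d' cut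
    else
      let r := pvDfsB vecs n nxt d'
      if r.1 then (true, false) else pvDfsGo vecs n rest s d' (cut || r.2)
termination_by (d', vs.length + 1)
end

-- for bound in range(1, max_presses + 1): ...
def pvLoopB (vecs : List (List Int)) (n : Int) (mx : Int) (target : List Int) (bound : Int) : Int :=
  if mx + 1 ≤ bound then -1
  else
    let r := pvDfsB vecs n target bound.toNat
    if r.1 then bound
    else if r.2 then pvLoopB vecs n mx target (bound + 1) else -1
termination_by (mx + 1 - bound).toNat

def find_minimum_with_limit_alt (buttons : List (List String)) (target : List Int) (max_presses : Int) : Int :=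
  let n : Int := PySem.List.len target
  if pvIsZero target then 0
  else if max_presses ≤ 0 then -1
  else pvLoopB (pvVecs buttons n) n max_presses target 1

-- ===== PRECONDITION & SPEC =====
-- Pre_ excludes the inputs on which Python A raises: a button entry among the first
-- len(target) that int() cannot parse, or a button shorter than target, evaluated during an
-- expansion (ValueError/IndexError).  It thereby also excludes the rare inputs with such a
-- malformed button where A happens to return before evaluating it (first expansion hits the
-- goal through an earlier button): there A returns while B raises — see the cite.
def Pre_find_minimum_with_limit (buttons : List (List String)) (target : List Int) (max_presses : Int) : Prop :=
  (target.all (fun x => decide (x = 0)) = true) ∨ max_presses ≤ 0 ∨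
    (∀ b ∈ buttons, target.length ≤ b.length ∧
      ((b.take target.length).all (fun t => (PySem.Int.ofStr? t).isSome)) = true)
instance (buttons : List (List String)) (target : List Int) (max_presses : Int) : Decidable (Pre_find_minimum_with_limit buttons target max_presses) := by unfold Pre_find_minimum_with_limit; infer_instance

def pvWitness_find_minimum_with_limit : List (List String) × List Int × Int := ([["1"]], [2], 5)

def Spec_find_minimum_with_limit (buttons : List (List String)) (target : List Int) (max_presses : Int) (out : Int) : Prop := out = find_minimum_with_limit_alt buttons target max_presses
instance (buttons : List (List String)) (target : List Int) (max_presses : Int) (out : Int) : Decidable (Spec_find_minimum_with_limit buttons target max_presses out) := by unfold Spec_find_minimum_with_limit; infer_instance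

-- ===== CLAIM (what is proved, stated in full; the proofs are below) =====
def Claim_equal_find_minimum_with_limit : Prop := ∀ (buttons : List (List String)) (target : List Int) (max_presses : Int), Dom_find_minimum_with_limit buttons target max_presses → Pre_find_minimum_with_limit buttons target max_presses → Spec_find_minimum_with_limit buttons target max_presses (find_minimum_with_limit buttons target max_presses)

-- ===== LEMMAS AND PROOFS =====

-- ---------- shared relational layer: goal-free paths and bounded reachability ----------

-- one admissible move: subtract some button vector, all coordinates stay nonnegative
def pvStepP (B : List (List String)) (n : Int) (s u : List Int) : Prop :=
  ∃ b ∈ B, u = pvChildA n s b ∧ pvAnyNeg u = false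

-- some button takes s exactly to the goal vector
def pvGoalStep (B : List (List String)) (n : Int) (g s : List Int) : Prop :=
  ∃ b ∈ B, pvChildA n s b = g

-- goal-free admissible path of exact length k from s to t
def pvNR (B : List (List String)) (n : Int) (g : List Int) : List Int → List Int → Nat → Prop
  | s, t, 0 => t = s
  | s, t, k + 1 => ∃ u, pvStepP B n s u ∧ u ≠ g ∧ pvNR B n g u t k

-- goal reachable from s within d admissible moves
def pvRLe (B : List (List String)) (n : Int) (g : List Int) : List Int → Nat → Prop
  | s, 0 => s = g
  | s, d + 1 => s = g ∨ ∃ u, pvStepP B n s u ∧ pvRLe B n g u d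

theorem pvChildA_length (n : Int) (s : List Int) (b : List String) :
    (pvChildA n s b).length = n.toNat := by
  simp [pvChildA, PySem.List.length_pyRange_one]

theorem pvIsZero_iff (s : List Int) : pvIsZero s = true ↔ s = List.replicate s.length 0 := by
  rw [List.eq_replicate_iff]
  simp [pvIsZero, List.all_eq_true]

theorem pvAnyNeg_replicate (m : Nat) : pvAnyNeg (List.replicate m 0) = false := by
  simp [pvAnyNeg]

theorem pvNxt_eq (n : Int) (s : List Int) (b : List String) :
    pvNxt n s ((PySem.List.pyRange 0 n 1).map
      (fun i => (PySem.Int.ofStr? (PySem.List.pyGetD b i "")).getD 0)) = pvChildA n s b := by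
  apply List.map_congr_left
  intro i hi
  obtain ⟨h0, h1⟩ := PySem.List.mem_pyRange_one.1 hi
  rw [PySem.List.pyGetD_map_pyRange_of_nonneg _ _ _ _ h0 h1]

theorem pvNR_snoc (B : List (List String)) (n : Int) (g : List Int) :
    ∀ (k : Nat) (s v u : List Int), pvNR B n g s v k → pvStepP B n v u → u ≠ g →
      pvNR B n g s u (k + 1) := by
  intro k
  induction k with
  | zero => intro s v u h hs hu; cases h; exact ⟨u, hs, hu, rfl⟩
  | succ k ih =>
    intro s v u h hs hu
    obtain ⟨w, hw, hwg, hrest⟩ := h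
    exact ⟨w, hw, hwg, ih _ _ _ hrest hs hu⟩

theorem pvNR_snoc_iff (B : List (List String)) (n : Int) (g : List Int) :
    ∀ (k : Nat) (s u : List Int), pvNR B n g s u (k + 1) ↔
      ∃ v, pvNR B n g s v k ∧ pvStepP B n v u ∧ u ≠ g := by
  intro k
  induction k with
  | zero =>
    intro s u
    constructor
    · rintro ⟨w, hw, hwg, rfl⟩; exact ⟨s, rfl, hw, hwg⟩
    · rintro ⟨v, rfl, hs, hu⟩; exact ⟨u, hs, hu, rfl⟩
  | succ k ih =>
    intro s u
    constructor
    · rintro ⟨w, hw, hwg, hrest⟩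
      obtain ⟨v, h1, h2, h3⟩ := (ih _ _).1 hrest
      exact ⟨v, ⟨w, hw, hwg, h1⟩, h2, h3⟩
    · rintro ⟨v, ⟨w, hw, hwg, h1⟩, h2, h3⟩
      exact ⟨w, hw, hwg, (ih _ _).2 ⟨v, h1, h2, h3⟩⟩

theorem pvRLe_firstHit (B : List (List String)) (n : Int) (g : List Int) :
    ∀ (d : Nat) (s : List Int), s ≠ g → pvRLe B n g s d →
      ∃ k t, k + 1 ≤ d ∧ pvNR B n g s t k ∧ pvGoalStep B n g t := by
  intro d
  induction d with
  | zero => intro s hs h; exact absurd h hs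
  | succ d ih =>
    intro s hs h
    rcases h with h | ⟨u, hu, hr⟩
    · exact absurd h hs
    · by_cases hug : u = g
      · subst hug
        obtain ⟨b, hb, hc, _⟩ := hu
        exact ⟨0, s, by omega, rfl, ⟨b, hb, hc.symm⟩⟩
      · obtain ⟨k, t, hk, hnr, hgs⟩ := ih u hug hr
        exact ⟨k + 1, t, by omega, ⟨u, hu, hug, hnr⟩, hgs⟩

theorem pvRLe_of_hit (B : List (List String)) (n : Int) (g : List Int)
    (hg : pvAnyNeg g = false) :
    ∀ (k : Nat) (s t : List Int), pvNR B n g s t k → pvGoalStep B n g t →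
      pvRLe B n g s (k + 1) := by
  intro k
  induction k with
  | zero =>
    rintro s t rfl ⟨b, hb, hc⟩
    exact Or.inr ⟨g, ⟨b, hb, hc.symm, hg⟩, rfl⟩
  | succ k ih =>
    rintro s t ⟨u, hu, hug, hrest⟩ hgs
    exact Or.inr ⟨u, hu, ih _ _ hrest hgs⟩

-- ---------- the inner expansion loop of A ----------

theorem pvExpandA_inl_spec (n : Int) (g s : List Int) (p r : Int) :
    ∀ (bs : List (List String)) (V : PySem.Set (List Int)) (acc : List (List Int × Int)),
      pvExpandA n g s p bs V acc = Sum.inl r →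
      r = p + 1 ∧ ∃ b ∈ bs, pvChildA n s b = g := by
  intro bs
  induction bs with
  | nil => intro V acc h; simp [pvExpandA] at h
  | cons b bs ih =>
    intro V acc h
    simp only [pvExpandA] at h
    split at h
    · obtain ⟨h1, b', hb', hc⟩ := ih _ _ h
      exact ⟨h1, b', List.mem_cons_of_mem _ hb', hc⟩
    · split at h
      · cases h
        exact ⟨rfl, b, List.mem_cons_self, by assumption⟩
      · split at h
        · obtain ⟨h1, b', hb', hc⟩ := ih _ _ h
          exact ⟨h1, b', List.mem_cons_of_mem _ hb', hc⟩
        · obtain ⟨h1, b', hb', hc⟩ := ih _ _ h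
          exact ⟨h1, b', List.mem_cons_of_mem _ hb', hc⟩

theorem pvExpandA_inr_spec (n : Int) (g s : List Int) (p : Int) (hg : pvAnyNeg g = false) :
    ∀ (bs : List (List String)) (V : PySem.Set (List Int)) (acc : List (List Int × Int))
      (nw : List (List Int × Int)) (V' : PySem.Set (List Int)),
      pvExpandA n g s p bs V acc = Sum.inr (nw, V') →
      (∀ b ∈ bs, pvChildA n s b ≠ g) ∧
      ∃ fresh : List (List Int),
        nw = acc ++ fresh.map (fun u => (u, p + 1)) ∧
        V' = V ++ fresh ∧
        (∀ u ∈ fresh, (∃ b ∈ bs, u = pvChildA n s b ∧ pvAnyNeg u = false) ∧ u ≠ g ∧ u ∉ V) ∧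
        (∀ u, (∃ b ∈ bs, u = pvChildA n s b ∧ pvAnyNeg u = false) → u ≠ g → u ∈ V ∨ u ∈ fresh) := by
  intro bs
  induction bs with
  | nil =>
    intro V acc nw V' h
    simp only [pvExpandA, Sum.inr.injEq, Prod.mk.injEq] at h
    refine ⟨by simp, [], by simp [h.1.symm], by simp [h.2.symm], by simp, by simp⟩
  | cons b bs ih =>
    intro V acc nw V' h
    simp only [pvExpandA] at h
    split at h
    · rename_i hneg
      obtain ⟨hng, fresh, h1, h2, h3, h4⟩ := ih _ _ _ _ h
      refine ⟨?_, fresh, h1, h2, ?_, ?_⟩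
      · intro b' hb'
        rcases List.mem_cons.1 hb' with rfl | hmem
        · intro hc; rw [hc] at hneg; rw [hg] at hneg; cases hneg
        · exact hng b' hmem
      · intro u hu
        obtain ⟨⟨b', hb', hueq, hun⟩, h5, h6⟩ := h3 u hu
        exact ⟨⟨b', List.mem_cons_of_mem _ hb', hueq, hun⟩, h5, h6⟩
      · rintro u ⟨b', hb', hueq, hun⟩ hug
        rcases List.mem_cons.1 hb' with rfl | hmem
        · rw [← hueq] at hneg; rw [hun] at hneg; cases hneg
        · exact h4 u ⟨b', hmem, hueq, hun⟩ hug
    · split at h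
      · cases h
      · split at h
        · rename_i hneg hgoal hv
          obtain ⟨hng, fresh, h1, h2, h3, h4⟩ := ih _ _ _ _ h
          refine ⟨?_, fresh, h1, h2, ?_, ?_⟩
          · intro b' hb'
            rcases List.mem_cons.1 hb' with rfl | hmem
            · exact hgoal
            · exact hng b' hmem
          · intro u hu
            obtain ⟨⟨b', hb', hueq, hun⟩, h5, h6⟩ := h3 u hu
            exact ⟨⟨b', List.mem_cons_of_mem _ hb', hueq, hun⟩, h5, h6⟩
          · rintro u ⟨b', hb', hueq, hun⟩ hug
            rcases List.mem_cons.1 hb' with rfl | hmem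
            · subst hueq
              exact Or.inl ((PySem.Set.contains_iff _ _).1 hv)
            · exact h4 u ⟨b', hmem, hueq, hun⟩ hug
        · rename_i hneg hgoal hv
          have hnotmem : pvChildA n s b ∉ V := fun hmem =>
            hv ((PySem.Set.contains_iff _ _).2 hmem)
          obtain ⟨hng, fresh, h1, h2, h3, h4⟩ := ih _ _ _ _ h
          refine ⟨?_, pvChildA n s b :: fresh, ?_, ?_, ?_, ?_⟩
          · intro b' hb'
            rcases List.mem_cons.1 hb' with rfl | hmem
            · exact hgoal
            · exact hng b' hmem
          · rw [h1]; simp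
          · rw [h2, PySem.Set.add_of_not_mem hnotmem]; simp
          · intro u hu
            rcases List.mem_cons.1 hu with rfl | hmem
            · exact ⟨⟨b, List.mem_cons_self, rfl, by simpa using hneg⟩, hgoal, hnotmem⟩
            · obtain ⟨⟨b', hb', hueq, hun⟩, h5, h6⟩ := h3 u hmem
              refine ⟨⟨b', List.mem_cons_of_mem _ hb', hueq, hun⟩, h5, fun hc => h6 ?_⟩
              rw [PySem.Set.add_of_not_mem hnotmem]
              exact List.mem_append_left _ hc
          · rintro u ⟨b', hb', hueq, hun⟩ hug
            rcases List.mem_cons.1 hb' with rfl | hmem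
            · exact Or.inr (hueq ▸ List.mem_cons_self)
            · rcases h4 u ⟨b', hmem, hueq, hun⟩ hug with hc | hc
              · rw [PySem.Set.add_of_not_mem hnotmem] at hc
                rcases List.mem_append.1 hc with hc | hc
                · exact Or.inl hc
                · simp at hc; subst hc; exact Or.inr List.mem_cons_self
              · exact Or.inr (List.mem_cons_of_mem _ hc)

-- ---------- correctness of A's BFS loop: the negative case ----------

theorem pvLoopA_neg (B : List (List String)) (n : Int) (g tgt : List Int) (mx : Int)
    (hg : pvAnyNeg g = false)
    (H : ∀ t k, pvNR B n g tgt t k → pvGoalStep B n g t → ¬ ((k : Int) < mx)) :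
    ∀ (M : Nat) (Q : List (List Int × Int)) (V : PySem.Set (List Int)),
      pvQMeasure (B.length + 1) mx Q = M →
      (∀ e ∈ Q, 0 ≤ e.2 ∧ pvNR B n g tgt e.1 e.2.toNat) →
      pvLoopA B n g mx Q V = -1 := by
  intro M
  induction M using Nat.strong_induction_on with
  | _ M ih =>
    intro Q V hM hQ
    cases Q with
    | nil => rw [pvLoopA]
    | cons e Q' =>
      obtain ⟨st, p⟩ := e
      rw [pvLoopA]
      by_cases hpm : mx ≤ p
      · rw [if_pos hpm]
        exact ih _ (by rw [← hM]; exact pvQMeasure_tail _ (by omega) _ _ _) _ V rfl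
          (fun e he => hQ e (List.mem_cons_of_mem _ he))
      · rw [if_neg hpm]
        split
        · rename_i r heq
          obtain ⟨hr, b, hb, hc⟩ := pvExpandA_inl_spec n g st p r B V [] heq
          have hp0 : 0 ≤ p := (hQ (st, p) List.mem_cons_self).1
          have hNR : pvNR B n g tgt st p.toNat := (hQ (st, p) List.mem_cons_self).2
          have hno := H st p.toNat hNR ⟨b, hb, hc⟩
          exact absurd (show ((p.toNat : Int)) < mx by omega) hno
        · rename_i nw V' heq
          obtain ⟨hng, fresh, hnw, hV', hfr, hcomp⟩ :=
            pvExpandA_inr_spec n g st p hg B V [] nw V' heq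
          obtain ⟨hlen', hsnd'⟩ := pvExpandA_entries n g st p B V [] nw V' heq
          apply ih _ ?_ _ V' rfl ?_
          · rw [← hM]
            exact pvQMeasure_expand _ (by omega) _ _ (by omega) st Q' nw
              (fun e he => ((hsnd' e he).resolve_left (by simp))) (by simpa using hlen')
          · intro e he
            rcases List.mem_append.1 he with he' | he'
            · exact hQ e (List.mem_cons_of_mem _ he')
            · rw [hnw] at he'
              simp only [List.nil_append] at he'
              obtain ⟨u, hu, rfl⟩ := List.mem_map.1 he'
              obtain ⟨hstep, hug, -⟩ := hfr u hu
              have hp0 : 0 ≤ p := (hQ (st, p) List.mem_cons_self).1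
              have hNRs : pvNR B n g tgt st p.toNat := (hQ (st, p) List.mem_cons_self).2
              refine ⟨by omega, ?_⟩
              have : (p + 1).toNat = p.toNat + 1 := by omega
              rw [this]
              exact pvNR_snoc B n g p.toNat tgt st u hNRs hstep hug

-- ---------- correctness of A's BFS loop: the positive case ----------

-- the decomposed BFS invariant: Q spans levels ℓ and ℓ+1, entries carry their exact BFS
-- distance, V = expanded ∪ queued, all states at distance ≤ ℓ are discovered, children of
-- expanded states are discovered, and no expanded state has a goal child
def pvInvD (B : List (List String)) (n : Int) (g tgt : List Int) (ℓ : Nat)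
    (E : List (List Int)) (Q1 Q2 Q : List (List Int × Int)) (V : PySem.Set (List Int)) : Prop :=
  Q = Q1 ++ Q2 ∧ (∀ e ∈ Q1, e.2 = (ℓ : Int)) ∧ (∀ e ∈ Q2, e.2 = (ℓ : Int) + 1) ∧
  (∀ e ∈ Q, pvNR B n g tgt e.1 e.2.toNat ∧ ∀ j : Nat, j < e.2.toNat → ¬ pvNR B n g tgt e.1 j) ∧
  (∀ u, u ∈ V ↔ u ∈ E ∨ ∃ q, (u, q) ∈ Q) ∧
  (∀ u k, pvNR B n g tgt u k → k ≤ ℓ → u ∈ V) ∧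
  (∀ s ∈ E, ∀ u, pvStepP B n s u → u ≠ g → u ∈ V) ∧
  (∀ s ∈ E, ¬ pvGoalStep B n g s)

def pvInv (B : List (List String)) (n : Int) (g tgt : List Int)
    (Q : List (List Int × Int)) (V : PySem.Set (List Int)) : Prop :=
  ∃ ℓ E Q1 Q2, pvInvD B n g tgt ℓ E Q1 Q2 Q V

theorem pvInvD_shift (B : List (List String)) (n : Int) (g tgt : List Int) (ℓ : Nat)
    (E : List (List Int)) (Q2 Q : List (List Int × Int)) (V : PySem.Set (List Int))
    (h : pvInvD B n g tgt ℓ E [] Q2 Q V) : pvInvD B n g tgt (ℓ + 1) E Q2 [] Q V := by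
  obtain ⟨h1, h2, h3, h4, h5, h6, h7, h8⟩ := h
  refine ⟨by simpa using h1, fun e he => by rw [h3 e he]; push_cast; ring, by simp, h4, h5, ?_, h7, h8⟩
  intro u k hNR hk
  rcases Nat.lt_or_ge k (ℓ + 1) with hk' | hk'
  · exact h6 u k hNR (by omega)
  · have hkeq : k = ℓ + 1 := by omega
    subst hkeq
    obtain ⟨v, hv, hstep, hug⟩ := (pvNR_snoc_iff B n g ℓ tgt u).1 hNR
    have hvV : v ∈ V := h6 v ℓ hv (le_refl _)
    rcases (h5 v).1 hvV with hvE | ⟨q, hq⟩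
    · exact h7 v hvE u hstep hug
    · have hq2 : q = (ℓ : Int) + 1 := by
        rw [h1] at hq
        simpa using h3 (v, q) hq
      have hshort := (h4 (v, q) hq).2
      exfalso
      apply hshort ℓ
      · simp only [hq2]; omega
      · exact hv

theorem pvInv_nil_reach (B : List (List String)) (n : Int) (g tgt : List Int) (ℓ : Nat)
    (E : List (List Int)) (Q1 Q2 : List (List Int × Int)) (V : PySem.Set (List Int))
    (h : pvInvD B n g tgt ℓ E Q1 Q2 [] V) :
    ∀ k u, pvNR B n g tgt u k → u ∈ E := by
  obtain ⟨h1, h2, h3, h4, h5, h6, h7, h8⟩ := h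
  intro k
  induction k with
  | zero =>
    rintro u rfl
    rcases (h5 u).1 (h6 u 0 rfl (by omega)) with hE | ⟨q, hq⟩
    · exact hE
    · cases hq
  | succ k ih =>
    intro u hNR
    obtain ⟨v, hv, hstep, hug⟩ := (pvNR_snoc_iff B n g k tgt u).1 hNR
    have hvE := ih v hv
    rcases (h5 u).1 (h7 v hvE u hstep hug) with hE | ⟨q, hq⟩
    · exact hE
    · cases hq

theorem pvInv_cons (B : List (List String)) (n : Int) (g tgt : List Int)
    (s : List Int) (p : Int) (Q' : List (List Int × Int)) (V : PySem.Set (List Int))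
    (h : pvInv B n g tgt ((s, p) :: Q') V) :
    ∃ ℓ E Q1t Q2, pvInvD B n g tgt ℓ E ((s, p) :: Q1t) Q2 ((s, p) :: Q') V ∧ Q' = Q1t ++ Q2 := by
  obtain ⟨ℓ, E, Q1, Q2, hD⟩ := h
  cases Q1 with
  | nil =>
    have hQ2 : Q2 = (s, p) :: Q' := by
      have := hD.1; simpa using this.symm
    subst hQ2
    have hD' := pvInvD_shift B n g tgt ℓ E _ _ V hD
    exact ⟨ℓ + 1, E, Q', [], by simpa using hD', by simp⟩
  | cons e Q1t =>
    have h1 := hD.1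
    rw [List.cons_append] at h1
    obtain ⟨he, hQ'⟩ := List.cons.injEq _ _ _ _ ▸ h1
    cases he
    exact ⟨ℓ, E, Q1t, Q2, hD, hQ'⟩

theorem pvLoopA_pos (B : List (List String)) (n : Int) (g tgt : List Int) (mx : Int)
    (hg : pvAnyNeg g = false) (m : Nat) (t0 : List Int)
    (hm0 : pvNR B n g tgt t0 m) (hm1 : pvGoalStep B n g t0)
    (hmin : ∀ t k, pvNR B n g tgt t k → pvGoalStep B n g t → m ≤ k)
    (hmx : (m : Int) < mx) :
    ∀ (M : Nat) (Q : List (List Int × Int)) (V : PySem.Set (List Int)),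
      pvQMeasure (B.length + 1) mx Q = M →
      pvInv B n g tgt Q V →
      pvLoopA B n g mx Q V = (m : Int) + 1 := by
  intro M
  induction M using Nat.strong_induction_on with
  | _ M ih =>
    intro Q V hM hInv
    cases Q with
    | nil =>
      obtain ⟨ℓ, E, Q1, Q2, hD⟩ := hInv
      exact absurd hm1 (hD.2.2.2.2.2.2.2 t0 (pvInv_nil_reach B n g tgt ℓ E Q1 Q2 V hD m t0 hm0))
    | cons e Q' =>
      obtain ⟨st, p⟩ := e
      obtain ⟨ℓ, E, Q1t, Q2, hD, hQ'⟩ := pvInv_cons B n g tgt st p Q' V hInv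
      obtain ⟨h1, h2, h3, h4, h5, h6, h7, h8⟩ := hD
      have hp : p = (ℓ : Int) := h2 (st, p) List.mem_cons_self
      have hq2' : ∀ e ∈ ((st, p) :: Q' : List (List Int × Int)), e.2 = (ℓ : Int) ∨ e.2 = (ℓ : Int) + 1 := by
        intro e he
        rw [h1] at he
        rcases List.mem_append.1 he with he' | he'
        · exact Or.inl (h2 e he')
        · exact Or.inr (h3 e he')
      have hlm : ℓ ≤ m := by
        by_contra hc
        have hmen : m ≤ ℓ := by omega
        have htV : t0 ∈ V := h6 t0 m hm0 hmen
        rcases (h5 t0).1 htV with hE | ⟨q, hq⟩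
        · exact absurd hm1 (h8 t0 hE)
        · have hqv := hq2' (t0, q) hq
          have hshort := (h4 (t0, q) hq).2
          apply hshort m
          · rcases hqv with hv | hv <;> (simp only at hv; omega)
          · exact hm0
      have hpmx : ¬ mx ≤ p := by omega
      rw [pvLoopA, if_neg hpmx]
      split
      · rename_i r heq
        obtain ⟨hr, b, hb, hc⟩ := pvExpandA_inl_spec n g st p r B V [] heq
        have hNRs : pvNR B n g tgt st p.toNat := (h4 (st, p) List.mem_cons_self).1
        have hptn : p.toNat = ℓ := by omega
        have hml : m ≤ ℓ := by
          have := hmin st p.toNat hNRs ⟨b, hb, hc⟩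
          omega
        omega
      · rename_i nw V' heq
        obtain ⟨hng, fresh, hnw, hV', hfr, hcomp⟩ :=
          pvExpandA_inr_spec n g st p hg B V [] nw V' heq
        obtain ⟨hlen', hsnd'⟩ := pvExpandA_entries n g st p B V [] nw V' heq
        simp only [List.nil_append] at hnw
        have hNRs : pvNR B n g tgt st p.toNat := (h4 (st, p) List.mem_cons_self).1
        have hptn : p.toNat = ℓ := by omega
        apply ih _ ?_ _ V' rfl ?_
        · rw [← hM]
          exact pvQMeasure_expand _ (by omega) _ _ (by omega) st Q' nw
            (fun e he => ((hsnd' e he).resolve_left (by simp))) (by simpa using hlen')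
        · refine ⟨ℓ, E ++ [st], Q1t, Q2 ++ nw, ?_, ?_, ?_, ?_, ?_, ?_, ?_, ?_⟩
          · rw [hQ', List.append_assoc]
          · exact fun e he => h2 e (List.mem_cons_of_mem _ he)
          · intro e he
            rcases List.mem_append.1 he with he' | he'
            · exact h3 e he'
            · rw [hnw] at he'
              obtain ⟨u, hu, rfl⟩ := List.mem_map.1 he'
              simp only
              omega
          · intro e he
            rcases List.mem_append.1 he with he' | he'
            · exact h4 e (List.mem_cons_of_mem _ he')
            · rw [hnw] at he'
              obtain ⟨u, hu, rfl⟩ := List.mem_map.1 he'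
              obtain ⟨hstep, hug, huV⟩ := hfr u hu
              have htn : (p + 1).toNat = ℓ + 1 := by omega
              constructor
              · simp only [htn]
                exact pvNR_snoc B n g ℓ tgt st u (hptn ▸ hNRs) hstep hug
              · intro j hj hNRj
                simp only [htn] at hj
                exact huV (h6 u j hNRj (by omega))
          · intro u
            constructor
            · intro huV'
              rw [hV'] at huV'
              rcases List.mem_append.1 huV' with huV | hufr
              · rcases (h5 u).1 huV with hE | ⟨q, hq⟩
                · exact Or.inl (List.mem_append_left _ hE)
                · rcases List.mem_cons.1 hq with hq' | hq'
                  · obtain ⟨rfl, rfl⟩ := Prod.mk.injEq _ _ _ _ ▸ hq'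
                    exact Or.inl (List.mem_append_right _ (by simp))
                  · exact Or.inr ⟨q, List.mem_append_left _ hq'⟩
              · refine Or.inr ⟨p + 1, List.mem_append_right _ ?_⟩
                rw [hnw]
                exact List.mem_map.2 ⟨u, hufr, rfl⟩
            · intro hu
              rw [hV']
              rcases hu with hE | ⟨q, hq⟩
              · rcases List.mem_append.1 hE with hE' | hE'
                · exact List.mem_append_left _ ((h5 u).2 (Or.inl hE'))
                · simp only [List.mem_singleton] at hE'
                  subst hE'
                  exact List.mem_append_left _ ((h5 u).2 (Or.inr ⟨p, List.mem_cons_self⟩))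
              · rcases List.mem_append.1 hq with hq' | hq'
                · exact List.mem_append_left _ ((h5 u).2 (Or.inr ⟨q, List.mem_cons_of_mem _ hq'⟩))
                · rw [hnw] at hq'
                  obtain ⟨u', hu', heq'⟩ := List.mem_map.1 hq'
                  obtain ⟨rfl, -⟩ := Prod.mk.injEq _ _ _ _ ▸ heq'
                  exact List.mem_append_right _ hu'
          · intro u k hNR hk
            rw [hV']
            exact List.mem_append_left _ (h6 u k hNR hk)
          · intro s' hs' u hstep hug
            rcases List.mem_append.1 hs' with hE | hst
            · rw [hV']
              exact List.mem_append_left _ (h7 s' hE u hstep hug)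
            · simp only [List.mem_singleton] at hst
              subst hst
              rcases hcomp u hstep hug with huV | hufr
              · rw [hV']; exact List.mem_append_left _ huV
              · rw [hV']; exact List.mem_append_right _ hufr
          · intro s' hs'
            rcases List.mem_append.1 hs' with hE | hst
            · exact h8 s' hE
            · simp only [List.mem_singleton] at hst
              subst hst
              rintro ⟨b, hb, hc⟩
              exact hng b hb hc

-- ---------- correctness of B's depth-limited DFS ----------

theorem pvDfsGo_fst (vecs : List (List Int)) (n : Int) :
    ∀ (vs : List (List Int)) (s : List Int) (d' : Nat) (cut : Bool),
      (pvDfsGo vecs n vs s d' cut).1 = true ↔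
        ∃ v ∈ vs, pvAnyNeg (pvNxt n s v) = false ∧ (pvDfsB vecs n (pvNxt n s v) d').1 = true := by
  intro vs
  induction vs with
  | nil => intro s d' cut; simp [pvDfsGo]
  | cons v rest ih =>
    intro s d' cut
    by_cases hneg : pvAnyNeg (pvNxt n s v) = true
    · rw [pvDfsGo]
      simp only [hneg, if_true, reduceIte]
      rw [ih]
      constructor
      · rintro ⟨v', hm, hp⟩; exact ⟨v', List.mem_cons_of_mem _ hm, hp⟩
      · rintro ⟨v', hm, hp⟩
        rcases List.mem_cons.1 hm with rfl | hm'
        · rw [hneg] at hp; cases hp.1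
        · exact ⟨v', hm', hp⟩
    · rw [Bool.not_eq_true] at hneg
      by_cases hf : (pvDfsB vecs n (pvNxt n s v) d').1 = true
      · rw [pvDfsGo]
        simp only [hneg, hf, Bool.false_eq_true, if_false, if_true]
        exact ⟨fun _ => ⟨v, List.mem_cons_self, hneg, hf⟩, fun _ => trivial⟩
      · rw [Bool.not_eq_true] at hf
        rw [pvDfsGo]
        simp only [hneg, hf, Bool.false_eq_true, if_false]
        rw [ih]
        constructor
        · rintro ⟨v', hm, hp⟩; exact ⟨v', List.mem_cons_of_mem _ hm, hp⟩
        · rintro ⟨v', hm, hp⟩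
          rcases List.mem_cons.1 hm with rfl | hm'
          · rw [hf] at hp; cases hp.2
          · exact ⟨v', hm', hp⟩

theorem pvDfsB_fst (buttons : List (List String)) (N : Nat) :
    ∀ (d : Nat) (s : List Int), s.length = N →
      ((pvDfsB (pvVecs buttons (N : Int)) (N : Int) s d).1 = true ↔
        pvRLe buttons (N : Int) (List.replicate N 0) s d) := by
  intro d
  induction d with
  | zero =>
    intro s hs
    rw [pvDfsB]
    by_cases hz : pvIsZero s = true
    · simp only [hz, if_true, reduceIte]
      have := (pvIsZero_iff s).1 hz
      simp [pvRLe, hs ▸ this]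
    · simp only [hz]
      rw [if_neg (by simpa using hz)]
      simp only [pvRLe]
      constructor
      · intro h; cases h
      · intro h
        exact absurd ((pvIsZero_iff s).2 (by rw [← hs] at h; exact h)) (by simpa using hz)
  | succ d ih =>
    intro s hs
    rw [pvDfsB]
    by_cases hz : pvIsZero s = true
    · simp only [hz, if_true, reduceIte]
      have := (pvIsZero_iff s).1 hz
      simp only [pvRLe]
      exact ⟨fun _ => Or.inl (hs ▸ this), fun _ => trivial⟩
    · rw [if_neg (by simpa using hz)]
      have hsne : s ≠ List.replicate N 0 := by
        intro hc
        exact absurd ((pvIsZero_iff s).2 (by rw [← hs] at hc; exact hc)) (by simpa using hz)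
      rw [pvDfsGo_fst]
      simp only [pvRLe]
      constructor
      · rintro ⟨v, hv, hneg, hfst⟩
        obtain ⟨b, hb, rfl⟩ := List.mem_map.1 hv
        rw [pvNxt_eq] at hneg hfst
        have hlen : (pvChildA (N : Int) s b).length = N := by
          rw [pvChildA_length]; simp
        exact Or.inr ⟨pvChildA (N : Int) s b, ⟨b, hb, rfl, hneg⟩, (ih _ hlen).1 hfst⟩
      · rintro (hc | ⟨u, ⟨b, hb, rfl, hneg⟩, hr⟩)
        · exact absurd hc hsne
        · have hlen : (pvChildA (N : Int) s b).length = N := by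
            rw [pvChildA_length]; simp
          refine ⟨(PySem.List.pyRange 0 (N : Int) 1).map
            (fun i => (PySem.Int.ofStr? (PySem.List.pyGetD b i "")).getD 0),
            List.mem_map.2 ⟨b, hb, rfl⟩, ?_, ?_⟩
          · rw [pvNxt_eq]; exact hneg
          · rw [pvNxt_eq]; exact (ih _ hlen).2 hr

theorem pvDfsGo_ff (vecs : List (List Int)) (n : Int) :
    ∀ (vs : List (List Int)) (s : List Int) (d' : Nat) (cut : Bool),
      pvDfsGo vecs n vs s d' cut = (false, false) →
      cut = false ∧ ∀ v ∈ vs, pvAnyNeg (pvNxt n s v) = false →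
        pvDfsB vecs n (pvNxt n s v) d' = (false, false) := by
  intro vs
  induction vs with
  | nil =>
    intro s d' cut h
    rw [pvDfsGo] at h
    cases h
    exact ⟨rfl, by intro v hv; cases hv⟩
  | cons v rest ih =>
    intro s d' cut h
    by_cases hneg : pvAnyNeg (pvNxt n s v) = true
    · rw [pvDfsGo] at h
      simp only [hneg, if_true, reduceIte] at h
      obtain ⟨h1, h2⟩ := ih _ _ _ h
      refine ⟨h1, fun v' hv' hn => ?_⟩
      rcases List.mem_cons.1 hv' with rfl | hm
      · rw [hneg] at hn; cases hn
      · exact h2 v' hm hn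
    · rw [Bool.not_eq_true] at hneg
      rw [pvDfsGo] at h
      simp only [hneg, reduceIte] at h
      by_cases hf : (pvDfsB vecs n (pvNxt n s v) d').1 = true
      · rw [hf] at h; simp only [if_true] at h; cases h
      · rw [Bool.not_eq_true] at hf
        rw [hf] at h; simp only [Bool.false_eq_true, if_false] at h
        obtain ⟨h1, h2⟩ := ih _ _ _ h
        have hcut : cut = false ∧ (pvDfsB vecs n (pvNxt n s v) d').2 = false := by
          rcases Bool.or_eq_false_iff.1 h1 with ⟨ha, hb⟩
          exact ⟨ha, hb⟩
        refine ⟨hcut.1, fun v' hv' hn => ?_⟩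
        rcases List.mem_cons.1 hv' with rfl | hm
        · exact Prod.ext (by simpa using hf) (by simpa using hcut.2)
        · exact h2 v' hm hn

theorem pvDfsB_saturate (buttons : List (List String)) (N : Nat) :
    ∀ (d : Nat) (s : List Int), s.length = N →
      pvDfsB (pvVecs buttons (N : Int)) (N : Int) s d = (false, false) →
      ∀ e, ¬ pvRLe buttons (N : Int) (List.replicate N 0) s e := by
  intro d
  induction d with
  | zero =>
    intro s hs h
    rw [pvDfsB] at h
    by_cases hz : pvIsZero s = true
    · rw [if_pos hz] at h; cases h
    · rw [if_neg (by simpa using hz)] at h; cases h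
  | succ d ih =>
    intro s hs h e
    by_cases hz : pvIsZero s = true
    · rw [pvDfsB, if_pos hz] at h; cases h
    · rw [pvDfsB, if_neg (by simpa using hz)] at h
      have hsne : s ≠ List.replicate N 0 := by
        intro hc
        exact absurd ((pvIsZero_iff s).2 (by rw [← hs] at hc; exact hc)) (by simpa using hz)
      obtain ⟨-, hall⟩ := pvDfsGo_ff _ _ _ _ _ _ h
      intro hr
      rcases e with _ | e
      · exact hsne hr
      · rcases hr with hc | ⟨u, ⟨b, hb, rfl, hneg⟩, hr⟩
        · exact hsne hc
        · have hlen : (pvChildA (N : Int) s b).length = N := by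
            rw [pvChildA_length]; simp
          have hv : ((PySem.List.pyRange 0 (N : Int) 1).map
              (fun i => (PySem.Int.ofStr? (PySem.List.pyGetD b i "")).getD 0)) ∈ pvVecs buttons (N : Int) :=
            List.mem_map.2 ⟨b, hb, rfl⟩
          have := hall _ hv (by rw [pvNxt_eq]; exact hneg)
          rw [pvNxt_eq] at this
          exact ih _ hlen this e hr

-- ---------- correctness of B's deepening loop ----------

theorem pvLoopB_neg (buttons : List (List String)) (N : Nat) (mx : Int) (tgt : List Int)
    (hlen : tgt.length = N)
    (H : ∀ d : Nat, 1 ≤ d → (d : Int) ≤ mx → ¬ pvRLe buttons (N : Int) (List.replicate N 0) tgt d) :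
    ∀ (F : Nat) (bound : Int), (mx + 1 - bound).toNat = F → 1 ≤ bound →
      pvLoopB (pvVecs buttons (N : Int)) (N : Int) mx tgt bound = -1 := by
  intro F
  induction F with
  | zero =>
    intro bound hF hb
    rw [pvLoopB, if_pos (by omega)]
  | succ F ih =>
    intro bound hF hb
    rw [pvLoopB, if_neg (by omega)]
    have hble : bound ≤ mx := by omega
    have hcast : ((bound.toNat : Int)) = bound := Int.toNat_of_nonneg (by omega)
    have hfound : (pvDfsB (pvVecs buttons (N : Int)) (N : Int) tgt bound.toNat).1 = false := by
      rw [Bool.eq_false_iff]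
      intro hc
      exact H bound.toNat (by omega) (by omega) ((pvDfsB_fst buttons N bound.toNat tgt hlen).1 hc)
    simp only [hfound, Bool.false_eq_true, if_false]
    by_cases hcut : (pvDfsB (pvVecs buttons (N : Int)) (N : Int) tgt bound.toNat).2 = true
    · simp only [hcut, if_true]
      exact ih (bound + 1) (by omega) (by omega)
    · rw [Bool.not_eq_true] at hcut
      simp only [hcut, Bool.false_eq_true, if_false]

theorem pvLoopB_pos (buttons : List (List String)) (N : Nat) (mx : Int) (tgt : List Int)
    (hlen : tgt.length = N) (m : Nat)
    (hr : pvRLe buttons (N : Int) (List.replicate N 0) tgt (m + 1))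
    (hnr : ∀ j : Nat, j ≤ m → ¬ pvRLe buttons (N : Int) (List.replicate N 0) tgt j)
    (hmx : (m : Int) + 1 ≤ mx) :
    ∀ (F : Nat) (bound : Int), ((m : Int) + 1 - bound).toNat = F → 1 ≤ bound → bound ≤ (m : Int) + 1 →
      pvLoopB (pvVecs buttons (N : Int)) (N : Int) mx tgt bound = (m : Int) + 1 := by
  intro F
  induction F with
  | zero =>
    intro bound hF hb1 hb2
    have hbeq : bound = (m : Int) + 1 := by omega
    subst hbeq
    rw [pvLoopB, if_neg (by omega)]
    have htn : ((m : Int) + 1).toNat = m + 1 := by omega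
    have hfound : (pvDfsB (pvVecs buttons (N : Int)) (N : Int) tgt ((m : Int) + 1).toNat).1 = true := by
      rw [htn]
      exact (pvDfsB_fst buttons N (m + 1) tgt hlen).2 hr
    simp only [hfound, if_true]
  | succ F ih =>
    intro bound hF hb1 hb2
    have hble : bound ≤ (m : Int) := by omega
    rw [pvLoopB, if_neg (by omega)]
    have hfound : (pvDfsB (pvVecs buttons (N : Int)) (N : Int) tgt bound.toNat).1 = false := by
      rw [Bool.eq_false_iff]
      intro hc
      exact hnr bound.toNat (by omega) ((pvDfsB_fst buttons N bound.toNat tgt hlen).1 hc)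
    simp only [hfound, Bool.false_eq_true, if_false]
    have hcut : (pvDfsB (pvVecs buttons (N : Int)) (N : Int) tgt bound.toNat).2 = true := by
      by_contra hc
      rw [Bool.not_eq_true] at hc
      have hpair : pvDfsB (pvVecs buttons (N : Int)) (N : Int) tgt bound.toNat = (false, false) :=
        Prod.ext (by simpa using hfound) (by simpa using hc)
      exact pvDfsB_saturate buttons N bound.toNat tgt hlen hpair (m + 1) hr
    simp only [hcut, if_true]
    exact ih (bound + 1) (by omega) (by omega) (by omega)

-- minimal witness of a nonempty ℕ-indexed predicate
theorem pv_exists_min {P : Nat → Prop} (h : ∃ k, P k) : ∃ m, P m ∧ ∀ j, P j → m ≤ j := by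
  obtain ⟨k, hk⟩ := h
  induction k using Nat.strong_induction_on with
  | _ k ih =>
    by_cases h' : ∃ j, j < k ∧ P j
    · obtain ⟨j, hj, hPj⟩ := h'
      exact ih j hj hPj
    · exact ⟨k, hk, fun j hPj => by
        by_contra hc
        exact h' ⟨j, by omega, hPj⟩⟩


-- ===== VERDICT (by name: the statement is the Claim_ definition above) =====
theorem find_minimum_with_limit_spec : Claim_equal_find_minimum_with_limit := by
  unfold Claim_equal_find_minimum_with_limit
  intro buttons target mx _hdom _hpre
  unfold Spec_find_minimum_with_limit
  simp only [find_minimum_with_limit, find_minimum_with_limit_alt, PySem.List.len_eq,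
    Int.toNat_natCast]
  by_cases hz : target = List.replicate target.length 0
  · rw [if_pos hz, if_pos ((pvIsZero_iff target).2 hz)]
  · rw [if_neg hz, if_neg (by
      intro hc
      exact hz ((pvIsZero_iff target).1 hc))]
    have hg : pvAnyNeg (List.replicate target.length 0) = false := pvAnyNeg_replicate _
    have hV0 : PySem.Set.ofList [target] = [target] :=
      PySem.Set.ofList_eq_self_of_nodup _ (List.nodup_singleton _)
    by_cases hex : ∃ k : Nat, ∃ t, pvNR buttons (target.length : Int) (List.replicate target.length 0) target t k ∧
        pvGoalStep buttons (target.length : Int) (List.replicate target.length 0) t ∧ (k : Int) < mx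
    · obtain ⟨m, ⟨t0, hm0, hm1, hmlt⟩, hminP⟩ := pv_exists_min hex
      have hmin : ∀ t k, pvNR buttons (target.length : Int) (List.replicate target.length 0) target t k →
          pvGoalStep buttons (target.length : Int) (List.replicate target.length 0) t → m ≤ k := by
        intro t k h1 h2
        by_contra hclt
        have hk : (k : Int) < mx := by omega
        have := hminP k ⟨t, h1, h2, hk⟩
        omega
      have hInv0 : pvInv buttons (target.length : Int) (List.replicate target.length 0) target
          [(target, 0)] (PySem.Set.ofList [target]) := by
        refine ⟨0, [], [(target, 0)], [], rfl, ?_, by simp, ?_, ?_, ?_, by simp, by simp⟩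
        · intro e he
          simp only [List.mem_singleton] at he
          subst he
          simp
        · intro e he
          simp only [List.mem_singleton] at he
          subst he
          exact ⟨rfl, by intro j hj; omega⟩
        · intro u
          rw [hV0]
          constructor
          · intro hu
            simp only [List.mem_singleton] at hu
            subst hu
            exact Or.inr ⟨0, List.mem_cons_self⟩
          · rintro (hu | ⟨q, hq⟩)
            · cases hu
            · simp only [List.mem_singleton, Prod.mk.injEq] at hq
              simp [hq.1]
        · intro u k hNR hk
          interval_cases k
          cases hNR
          rw [hV0]
          simp
      rw [pvLoopA_pos buttons (target.length : Int) (List.replicate target.length 0) target mx hg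
        m t0 hm0 hm1 hmin hmlt _ _ _ rfl hInv0]
      rw [if_neg (by omega)]
      rw [pvLoopB_pos buttons target.length mx target rfl m
        (pvRLe_of_hit buttons (target.length : Int) (List.replicate target.length 0) hg m target t0 hm0 hm1)
        ?_ (by omega) _ 1 rfl (by omega) (by omega)]
      intro j hj hR
      cases j with
      | zero => exact hz hR
      | succ j' =>
        obtain ⟨k, t, hk1, hNR, hGS⟩ := pvRLe_firstHit buttons (target.length : Int)
          (List.replicate target.length 0) (j' + 1) target hz hR
        have := hmin t k hNR hGS
        omega
    · rw [pvLoopA_neg buttons (target.length : Int) (List.replicate target.length 0) target mx hg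
        (fun t k h1 h2 hlt => hex ⟨k, t, h1, h2, hlt⟩) _ _ _ rfl
        (by
          intro e he
          simp only [List.mem_singleton] at he
          subst he
          exact ⟨le_refl _, rfl⟩)]
      by_cases hmx0 : mx ≤ 0
      · rw [if_pos hmx0]
      · rw [if_neg hmx0]
        rw [pvLoopB_neg buttons target.length mx target rfl ?_ _ 1 rfl (by omega)]
        intro d hd hdm hR
        obtain ⟨k, t, hk1, hNR, hGS⟩ := pvRLe_firstHit buttons (target.length : Int)
          (List.replicate target.length 0) d target hz hR
        exact hex ⟨k, t, hNR, hGS, by omega⟩
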